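-- pv_equiv track=rewrite | github.com/mrmartin/autoresearch-rivals | ingest.py | _current_breadcrumb
-- ===== SOURCE A (Python) =====
-- def _current_breadcrumb(pos: int, headings: list[tuple[int, int, str]]) -> str:
--     """Build a section breadcrumb for a chunk at char position pos."""
--     active: dict[int, str] = {}
--     for h_pos, h_level, h_text in headings:
--         if h_pos > pos:
--             break
--         # Clear deeper levels when a new heading at this level appears
--         for deeper in list(active.keys()):
--             if deeper >= h_level:
--                 del active[deeper]
--         active[h_level] = h_text
--
--     if not active:
--         return "§ (preamble)"
--     parts = [active[lvl] for lvl in sorted(active.keys())]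
--     return " > ".join(parts)
-- ===== SOURCE B (Python) =====
-- def _current_breadcrumb(pos: int, headings: list[tuple[int, int, str]]) -> str:
--     """Build a section breadcrumb for a chunk at char position pos."""
--     prefix = []
--     for h in headings:
--         if h[0] > pos:
--             break
--         prefix.append(h)
--     parts = []
--     threshold = None  # None means +infinity
--     for _h_pos, h_level, h_text in reversed(prefix):
--         if threshold is None or h_level < threshold:
--             parts.append(h_text)
--             threshold = h_level
--     parts.reverse()
--     return " > ".join(parts) if parts else "§ (preamble)"
-- ===== Notes on version B (the rewrite author's own statement) =====
-- stated objective: alternative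
-- what changed: Replaces the forward loop that maintains a level->text dict (clearing deeper levels, then sorting the keys at the end) with a single reverse walk over the pre-pos prefix keeping only a running minimum-level threshold, collecting the breadcrumb texts already in order, so no dict and no sort are needed.
import Mathlib
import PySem

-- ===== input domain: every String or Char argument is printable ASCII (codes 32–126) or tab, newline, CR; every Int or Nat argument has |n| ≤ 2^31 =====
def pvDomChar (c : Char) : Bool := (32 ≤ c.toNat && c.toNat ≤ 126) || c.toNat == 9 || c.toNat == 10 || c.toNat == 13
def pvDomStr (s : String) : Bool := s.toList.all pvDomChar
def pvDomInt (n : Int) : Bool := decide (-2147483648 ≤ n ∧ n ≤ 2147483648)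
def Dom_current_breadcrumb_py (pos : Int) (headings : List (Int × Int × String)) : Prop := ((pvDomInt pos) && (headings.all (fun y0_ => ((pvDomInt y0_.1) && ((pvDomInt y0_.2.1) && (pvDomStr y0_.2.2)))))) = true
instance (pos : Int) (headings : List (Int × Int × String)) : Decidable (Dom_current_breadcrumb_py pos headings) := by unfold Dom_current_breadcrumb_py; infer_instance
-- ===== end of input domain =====

-- B replaces A's forward dict-maintaining loop (clear deeper levels, sort keys at the end)
-- by a reverse walk over the pre-pos prefix with a running minimum-level threshold; alternative decomposition, same results.

-- ===== PORT A =====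
-- inner 'for deeper in list(active.keys()): if deeper >= h_level: del active[deeper]'
def aClear (active : PySem.Dict Int String) (hlevel : Int) : PySem.Dict Int String :=
  active.keys.foldl (fun d deeper => if deeper ≥ hlevel then d.erase deeper else d) active

-- outer 'for h_pos, h_level, h_text in headings: if h_pos > pos: break; …'
def aLoop (pos : Int) : List (Int × Int × String) → PySem.Dict Int String → PySem.Dict Int String
  | [], active => active
  | (hpos, hlevel, htext) :: rest, active =>
    if hpos > pos then active
    else aLoop pos rest ((aClear active hlevel).insert hlevel htext)

def current_breadcrumb_py (pos : Int) (headings : List (Int × Int × String)) : String :=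
  let active := aLoop pos headings PySem.Dict.empty
  if active.size = 0 then "§ (preamble)"
  else PySem.Str.join " > "
    ((PySem.List.sorted active.keys (fun x => x) false).map (fun lvl => active.getD lvl ""))

-- ===== PORT B =====
-- 'for h in headings: if h[0] > pos: break; prefix.append(h)'
def bPrefix (pos : Int) : List (Int × Int × String) → List (Int × Int × String)
  | [] => []
  | h :: rest => if h.1 > pos then [] else h :: bPrefix pos rest

-- 'for _h_pos, h_level, h_text in reversed(prefix): …' (argument is the reversed prefix)
def bCollect : List (Int × Int × String) → Option Int → List String → List String
  | [], _, parts => parts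
  | (_, hlevel, htext) :: rest, threshold, parts =>
    if threshold.all (fun th => decide (hlevel < th))
    then bCollect rest (some hlevel) (parts ++ [htext])
    else bCollect rest threshold parts

def current_breadcrumb_py_alt (pos : Int) (headings : List (Int × Int × String)) : String :=
  let parts := (bCollect (bPrefix pos headings).reverse none []).reverse
  if parts = [] then "§ (preamble)" else PySem.Str.join " > " parts

-- ===== PRECONDITION & SPEC =====
def Spec_current_breadcrumb_py (pos : Int) (headings : List (Int × Int × String)) (out : String) : Prop := out = current_breadcrumb_py_alt pos headings
instance (pos : Int) (headings : List (Int × Int × String)) (out : String) : Decidable (Spec_current_breadcrumb_py pos headings out) := by unfold Spec_current_breadcrumb_py; infer_instance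

-- ===== CLAIM (what is proved, stated in full; the proofs are below) =====
def Claim_equal_current_breadcrumb_py : Prop := ∀ (pos : Int) (headings : List (Int × Int × String)), Dom_current_breadcrumb_py pos headings → Spec_current_breadcrumb_py pos headings (current_breadcrumb_py pos headings)

-- ===== LEMMAS AND PROOFS =====

-- the abstract "stack" both programs compute: A as dict items, B by the reverse scan
def stackOf (hs : List (Int × Int × String)) : List (Int × String) :=
  hs.foldl (fun acc h => acc.filter (fun p => p.1 < h.2.1) ++ [(h.2.1, h.2.2)]) []

-- A's outer loop processes exactly bPrefix
theorem aLoop_eq_foldl_bPrefix (pos : Int) (hs : List (Int × Int × String))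
    (d : PySem.Dict Int String) :
    aLoop pos hs d = (bPrefix pos hs).foldl
      (fun d h => (aClear d h.2.1).insert h.2.1 h.2.2) d := by
  induction hs generalizing d with
  | nil => rfl
  | cons h rest ih =>
    obtain ⟨hp, hl, ht⟩ := h
    by_cases hc : hp > pos <;> simp [aLoop, bPrefix, hc, ih]

theorem eraseFold_items (L : Int) (ks : List Int) (d : PySem.Dict Int String) :
    (ks.foldl (fun d k => if k ≥ L then d.erase k else d) d).items
      = d.items.filter (fun p => !(ks.contains p.1 && decide (p.1 ≥ L))) := by
  induction ks generalizing d with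
  | nil => simp
  | cons k ks ih =>
    simp only [List.foldl_cons]
    rw [ih]
    by_cases hk : k ≥ L
    · simp only [if_pos hk, PySem.Dict.erase, List.filter_filter]
      apply List.filter_congr
      intro p _
      by_cases hpk : p.1 = k
      · simp [hpk, hk]
      · simp [hpk]
    · simp only [if_neg hk]
      apply List.filter_congr
      intro p _
      by_cases hpk : p.1 = k
      · subst hpk; simp [hk]
      · simp [hpk]

theorem aClear_items (d : PySem.Dict Int String) (L : Int) :
    (aClear d L).items = d.items.filter (fun p => decide (p.1 < L)) := by
  unfold aClear
  rw [eraseFold_items]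
  apply List.filter_congr
  intro p hp
  have hmem : p.1 ∈ d.keys := by
    simp only [PySem.Dict.keys]
    exact List.mem_map_of_mem hp
  simp only [List.contains_iff_mem.mpr hmem, Bool.true_and]
  by_cases h : p.1 < L
  · simp [h, show ¬ p.1 ≥ L by omega]
  · simp [h, show p.1 ≥ L by omega]

theorem aStep_items (d : PySem.Dict Int String) (L : Int) (s : String) :
    ((aClear d L).insert L s).items
      = d.items.filter (fun p => decide (p.1 < L)) ++ [(L, s)] := by
  have hnc : (aClear d L).contains L = false := by
    simp only [PySem.Dict.contains, aClear_items, List.any_eq_false]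
    intro p hp
    simp only [List.mem_filter, decide_eq_true_eq] at hp
    simp only [beq_iff_eq]
    omega
  rw [PySem.Dict.items_insert_of_not_contains _ s hnc, aClear_items]

theorem pairwise_step {l : List (Int × String)} (L : Int) (s : String)
    (h : l.Pairwise (fun a b => a.1 < b.1)) :
    (l.filter (fun p => decide (p.1 < L)) ++ [(L, s)]).Pairwise (fun a b => a.1 < b.1) := by
  apply List.pairwise_append.mpr
  refine ⟨h.filter _, List.pairwise_singleton _ _, ?_⟩
  intro a ha b hb
  simp only [List.mem_filter, decide_eq_true_eq] at ha
  simp only [List.mem_singleton] at hb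
  subst hb
  exact ha.2

theorem foldl_items (hs : List (Int × Int × String)) (d : PySem.Dict Int String)
    (hp : d.items.Pairwise (fun a b => a.1 < b.1)) :
    (hs.foldl (fun d h => (aClear d h.2.1).insert h.2.1 h.2.2) d).items
      = hs.foldl (fun acc h => acc.filter (fun p => p.1 < h.2.1) ++ [(h.2.1, h.2.2)]) d.items := by
  induction hs generalizing d with
  | nil => rfl
  | cons h rest ih =>
    simp only [List.foldl_cons]
    rw [ih _ (by rw [aStep_items]; exact pairwise_step _ _ hp), aStep_items]

theorem stackOf_pairwise (hs : List (Int × Int × String)) :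
    (stackOf hs).Pairwise (fun a b => a.1 < b.1) := by
  suffices h : ∀ (l : List (Int × String)), l.Pairwise (fun a b => a.1 < b.1) →
      (hs.foldl (fun acc h => acc.filter (fun p => p.1 < h.2.1) ++ [(h.2.1, h.2.2)]) l).Pairwise
        (fun a b => a.1 < b.1) by
    exact h [] (List.Pairwise.nil)
  induction hs with
  | nil => intro l hl; exact hl
  | cons h rest ih =>
    intro l hl
    simp only [List.foldl_cons]
    exact ih _ (by simpa using pairwise_step h.2.1 h.2.2 hl)

theorem aLoop_items (pos : Int) (hs : List (Int × Int × String)) :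
    (aLoop pos hs PySem.Dict.empty).items = stackOf (bPrefix pos hs) := by
  rw [aLoop_eq_foldl_bPrefix, foldl_items _ _ (by simp [PySem.Dict.empty])]
  rfl

-- threshold comparison: none = +infinity
def ltT (x : Int) (t : Option Int) : Bool := t.all (fun th => decide (x < th))

theorem bCollect_eq (hs : List (Int × Int × String)) (t : Option Int) (parts : List String) :
    bCollect hs.reverse t parts
      = parts ++ (((stackOf hs).filter (fun p => ltT p.1 t)).reverse.map Prod.snd) := by
  induction hs using List.reverseRecOn generalizing t parts with
  | nil => simp [bCollect, stackOf]
  | append_singleton xs h ih =>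
    obtain ⟨hp, L, s⟩ := h
    have hstack : stackOf (xs ++ [(hp, L, s)])
        = (stackOf xs).filter (fun p => p.1 < L) ++ [(L, s)] := by
      simp [stackOf]
    rw [List.reverse_append]
    simp only [List.reverse_singleton, List.singleton_append, bCollect]
    by_cases hlt : ltT L t = true
    · rw [if_pos (by exact hlt), ih, hstack]
      have hff : ((stackOf xs).filter (fun p => p.1 < L) ++ [(L, s)]).filter
            (fun p => ltT p.1 t)
          = (stackOf xs).filter (fun p => ltT p.1 (some L)) ++ [(L, s)] := by
        rw [List.filter_append, List.filter_filter]
        have h1 : ∀ p : Int × String, (ltT p.1 t && decide (p.1 < L)) = ltT p.1 (some L) := by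
          intro p
          cases t with
          | none => simp [ltT]
          | some th =>
            simp only [ltT, Option.all_some, decide_eq_true_eq] at hlt ⊢
            by_cases h2 : p.1 < L <;> simp [h2] <;> omega
        rw [List.filter_congr (fun p _ => h1 p)]
        simp [hlt]
      rw [hff]
      simp
    · rw [if_neg (by exact hlt), ih, hstack]
      have hff : ((stackOf xs).filter (fun p => p.1 < L) ++ [(L, s)]).filter
            (fun p => ltT p.1 t)
          = (stackOf xs).filter (fun p => ltT p.1 t) := by
        rw [List.filter_append, List.filter_filter]
        obtain ⟨th, rfl⟩ : ∃ th, t = some th := by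
          cases t with
          | none => simp [ltT] at hlt
          | some th => exact ⟨th, rfl⟩
        simp only [ltT, Option.all_some, decide_eq_true_eq] at hlt
        have h1 : ∀ p : Int × String, (ltT p.1 (some th) && decide (p.1 < L)) = ltT p.1 (some th) := by
          intro p
          simp only [ltT, Option.all_some]
          by_cases h2 : p.1 < th <;> simp [h2] <;> omega
        rw [List.filter_congr (fun p _ => h1 p)]
        simp [ltT, hlt]
      rw [hff]

theorem bParts_eq (pos : Int) (hs : List (Int × Int × String)) :
    (bCollect (bPrefix pos hs).reverse none []).reverse
      = (stackOf (bPrefix pos hs)).map Prod.snd := by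
  rw [bCollect_eq]
  simp [ltT]

theorem keys_eq_of_items {d : PySem.Dict Int String} {l : List (Int × String)}
    (h : d.items = l) : d.keys = l.map Prod.fst := by
  simp [PySem.Dict.keys, h]

theorem current_breadcrumb_eq (pos : Int) (hs : List (Int × Int × String)) :
    current_breadcrumb_py pos hs = current_breadcrumb_py_alt pos hs := by
  unfold current_breadcrumb_py current_breadcrumb_py_alt
  have hitems := aLoop_items pos hs
  have hpw := stackOf_pairwise (bPrefix pos hs)
  have hparts := bParts_eq pos hs
  set st := stackOf (bPrefix pos hs) with hst
  set d := aLoop pos hs PySem.Dict.empty with hd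
  have hkeys : d.keys = st.map Prod.fst := keys_eq_of_items hitems
  have hkpw : (st.map Prod.fst).Pairwise (fun a b : Int => a < b) :=
    List.Pairwise.map _ (fun a b h => h) hpw
  have hnodup : d.keys.Nodup := by
    rw [hkeys]; exact hkpw.nodup
  rw [hparts]
  by_cases hemp : st = []
  · simp [PySem.Dict.size, hitems, hemp]
  · have hsz : ¬ d.size = 0 := by
      simp only [PySem.Dict.size, hitems]
      simp [hemp]
    have hmne : ¬ (st.map Prod.snd = []) := by simp [hemp]
    rw [if_neg hsz, if_neg hmne]
    congr 1
    have hsorted : PySem.List.sorted d.keys (fun x => x) false = d.keys := by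
      apply PySem.List.sorted_eq_self_of_pairwise
      rw [hkeys]
      exact hkpw.imp (fun h => le_of_lt h)
    rw [hsorted]
    have hvals : d.keys.map (fun lvl => d.getD lvl "") = d.values :=
      (PySem.Dict.values_eq_map_keys d hnodup "").symm
    rw [hvals]
    simp [PySem.Dict.values, hitems]

-- ===== VERDICT (by name: the statement is the Claim_ definition above) =====
theorem current_breadcrumb_py_spec : Claim_equal_current_breadcrumb_py := by
  intro pos headings _
  unfold Spec_current_breadcrumb_py
  exact current_breadcrumb_eq pos headings
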